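-- pv_equiv track=rewrite | github.com/evgeniy-kulikov/unified-state-exam | 02/task_02_02.py | fn
-- ===== SOURCE A (Python) =====
-- def fn(a):
--     for x in range(1, 1000):  # целых положительных   x
--         for y in range(1, 1000):  # целых положительных   y
--             f1 = 6 * x + 4 * y != 34
--             f2 = a > 5 * x + 3 * y
--             f3 = a > 4 * y + 15 * x - 35
--             if not (f1 or f2 and f3):
--                 return False
--     return True
-- ===== SOURCE B (Python) =====
-- def fn(a):
--     # 6x+4y == 34 with x,y >= 1 has exactly three solutions; the constraint
--     # only matters there, so check just those.
--     for x, y in ((1, 7), (3, 4), (5, 1)):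
--         if not (a > 5 * x + 3 * y and a > 4 * y + 15 * x - 35):
--             return False
--     return True
-- ===== Notes on version B (the rewrite author's own statement) =====
-- stated objective: faster
-- what changed: Instead of scanning the full 999x999 grid, B solves 6x+4y=34 for positive integers (exactly (1,7),(3,4),(5,1)) and checks the implication only at those three points.
import Mathlib
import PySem

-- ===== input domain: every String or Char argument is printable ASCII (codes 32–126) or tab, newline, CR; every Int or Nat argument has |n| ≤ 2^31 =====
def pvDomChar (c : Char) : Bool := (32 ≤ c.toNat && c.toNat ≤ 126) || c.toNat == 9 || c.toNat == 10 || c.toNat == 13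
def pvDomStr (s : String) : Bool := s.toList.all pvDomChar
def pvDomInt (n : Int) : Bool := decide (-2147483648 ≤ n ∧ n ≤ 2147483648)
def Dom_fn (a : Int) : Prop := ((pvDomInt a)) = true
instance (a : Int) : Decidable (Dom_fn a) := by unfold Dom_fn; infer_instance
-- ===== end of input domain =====

-- B checks the constraint only at the three positive solutions of 6x+4y=34 instead of the full grid (faster by a constant ~3*10^5).

-- ===== PORT A =====
-- the early 'return False' makes each loop a short-circuit conjunction over its range
def fn (a : Int) : Bool :=
  (PySem.List.pyRange 1 1000 1).all (fun x =>
    (PySem.List.pyRange 1 1000 1).all (fun y =>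
      let f1 := decide (6 * x + 4 * y ≠ 34)
      let f2 := decide (a > 5 * x + 3 * y)
      let f3 := decide (a > 4 * y + 15 * x - 35)
      f1 || f2 && f3))

-- ===== PORT B =====
def fn_alt (a : Int) : Bool :=
  ([(1, 7), (3, 4), (5, 1)] : List (Int × Int)).all (fun p =>
    decide (a > 5 * p.1 + 3 * p.2) && decide (a > 4 * p.2 + 15 * p.1 - 35))

-- ===== PRECONDITION & SPEC =====
def Spec_fn (a : Int) (out : Bool) : Prop := out = fn_alt a
instance (a : Int) (out : Bool) : Decidable (Spec_fn a out) := by unfold Spec_fn; infer_instance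

-- ===== CLAIM (what is proved, stated in full; the proofs are below) =====
def Claim_equal_fn : Prop := ∀ (a : Int), Dom_fn a → Spec_fn a (fn a)

-- ===== LEMMAS AND PROOFS =====

lemma fn_eq_true_iff (a : Int) : fn a = true ↔ 44 < a := by
  unfold fn
  simp only [List.all_eq_true, PySem.List.mem_pyRange_one, Bool.or_eq_true,
    Bool.and_eq_true, decide_eq_true_eq]
  constructor
  · intro h
    have h5 := h 5 (by omega) 1 (by omega)
    omega
  · intro ha x hx y hy
    by_cases hxy : 6 * x + 4 * y = 34
    · right; omega
    · left; omega

lemma fn_alt_eq_true_iff (a : Int) : fn_alt a = true ↔ 44 < a := by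
  unfold fn_alt
  simp only [List.all_cons, List.all_nil, Bool.and_eq_true, decide_eq_true_eq]
  constructor
  · intro h; omega
  · intro h; refine ⟨⟨?_, ?_⟩, ⟨?_, ?_⟩, ⟨?_, ?_⟩, trivial⟩ <;> omega

-- ===== VERDICT (by name: the statement is the Claim_ definition above) =====
theorem fn_spec : Claim_equal_fn := by
  intro a _
  unfold Spec_fn
  by_cases h : 44 < a
  · rw [(fn_eq_true_iff a).mpr h, (fn_alt_eq_true_iff a).mpr h]
  · have h1 : fn a ≠ true := fun hc => h ((fn_eq_true_iff a).mp hc)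
    have h2 : fn_alt a ≠ true := fun hc => h ((fn_alt_eq_true_iff a).mp hc)
    simp only [Bool.not_eq_true] at h1 h2
    rw [h1, h2]
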